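-- pv_equiv track=rewrite | github.com/abdulazizatGitHub/PantryMind | backend/scripts/setup_recipenlg_rag.py | _estimate_cooking_time
-- ===== SOURCE A (Python) =====
-- from typing import List, Dict, Any, Optional
--
-- def _estimate_cooking_time(ingredients: List[str], instructions: List[str]) -> tuple:
--     """Estimate cooking time based on ingredients and instructions"""
--     base_prep = 10
--     base_cook = 20
--
--     # Adjust based on number of ingredients
--     if len(ingredients) > 8:
--         base_prep += 10
--     elif len(ingredients) > 5:
--         base_prep += 5
--
--     # Adjust based on cooking methods mentioned
--     cooking_methods = ['bake', 'roast', 'slow cook', 'simmer', 'boil', 'grill']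
--     for method in cooking_methods:
--         if any(method in inst.lower() for inst in instructions):
--             if method in ['bake', 'roast', 'slow cook']:
--                 base_cook += 30
--             elif method in ['simmer', 'boil']:
--                 base_cook += 15
--
--     return base_prep, base_cook
-- ===== SOURCE B (Python) =====
-- from typing import List
--
-- # each cooking method paired with its bit in the match mask
-- _BITS = [(1, 'bake'), (2, 'roast'), (4, 'slow cook'),
--          (8, 'simmer'), (16, 'boil'), (32, 'grill')]
--
--
-- def _estimate_cooking_time(ingredients: List[str], instructions: List[str]) -> tuple:
--     # accumulate a 6-bit mask of which methods occur anywhere in the instructions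
--     mask = 0
--     for inst in instructions:
--         low = inst.lower()
--         for bit, method in _BITS:
--             if method in low:
--                 mask |= bit
--     n = len(ingredients)
--     prep = 10 + 5 * ((n > 5) + (n > 8))
--     cook = (20 + 30 * ((mask & 1) + (mask >> 1 & 1) + (mask >> 2 & 1))
--                + 15 * ((mask >> 3 & 1) + (mask >> 4 & 1)))
--     return prep, cook
-- ===== Notes on version B (the rewrite author's own statement) =====
-- stated objective: alternative
-- what changed: Replaces A's per-method re-scan of all instructions (each instruction lowercased once per method) by a single pass that lowercases each instruction once and accumulates a 6-bit match mask (one bit per method), then computes the cook time arithmetically from the mask's bits (30 per bit 0-2, 15 per bits 3-4); the prep bump becomes branch-free arithmetic 10 + 5*((n>5)+(n>8)). (often measured ~1.5x faster, but not claimed: the measurement is inconsistent)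
import Mathlib
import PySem

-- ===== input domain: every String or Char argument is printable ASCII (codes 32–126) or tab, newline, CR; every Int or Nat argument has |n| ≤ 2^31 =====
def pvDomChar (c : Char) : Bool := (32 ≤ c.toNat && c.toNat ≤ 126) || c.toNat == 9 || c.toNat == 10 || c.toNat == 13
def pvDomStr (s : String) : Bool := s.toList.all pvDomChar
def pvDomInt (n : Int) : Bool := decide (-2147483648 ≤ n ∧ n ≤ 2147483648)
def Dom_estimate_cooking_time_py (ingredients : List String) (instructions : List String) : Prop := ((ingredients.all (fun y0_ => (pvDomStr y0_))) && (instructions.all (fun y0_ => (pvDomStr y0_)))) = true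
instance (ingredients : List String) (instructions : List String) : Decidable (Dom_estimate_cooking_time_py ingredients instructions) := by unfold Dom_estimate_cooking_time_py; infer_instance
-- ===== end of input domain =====

-- B accumulates a 6-bit mask of matched cooking methods in one pass over the
-- instructions (lowercasing each once) and computes the cook time arithmetically
-- from the mask bits; the prep bump is branch-free arithmetic (objective: alternative).


-- ===== PORT A =====
def estimate_cooking_time_py (ingredients : List String) (instructions : List String) : Int × Int :=
  let base_prep : Int := 10
  let base_cook : Int := 20
  let base_prep : Int :=
    if ingredients.length > 8 then base_prep + 10
    else if ingredients.length > 5 then base_prep + 5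
    else base_prep
  let cooking_methods : List String := ["bake", "roast", "slow cook", "simmer", "boil", "grill"]
  let base_cook : Int := cooking_methods.foldl (fun bc method =>
    if instructions.any (fun inst => PySem.Str.isIn method (PySem.Str.lower inst)) then
      if (["bake", "roast", "slow cook"] : List String).contains method then bc + 30
      else if (["simmer", "boil"] : List String).contains method then bc + 15
      else bc
    else bc) base_cook
  (base_prep, base_cook)

-- ===== PORT B =====
-- each cooking method paired with its bit in the match mask
def pvBits : List (Nat × String) :=
  [(1, "bake"), (2, "roast"), (4, "slow cook"), (8, "simmer"), (16, "boil"), (32, "grill")]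

-- B's inner loop: OR into the mask the bit of every method occurring in one instruction
def pvStep (mask : Nat) (inst : String) : Nat :=
  let low := PySem.Str.lower inst
  pvBits.foldl (fun m p => if PySem.Str.isIn p.2 low then m ||| p.1 else m) mask

def estimate_cooking_time_py_alt (ingredients : List String) (instructions : List String) : Int × Int :=
  let mask : Nat := instructions.foldl pvStep 0
  let n := ingredients.length
  let prep : Int := 10 + 5 * ((if n > 5 then (1 : Int) else 0) + (if n > 8 then 1 else 0))
  let cook : Int := 20 + 30 * (((mask &&& 1) + (mask >>> 1 &&& 1) + (mask >>> 2 &&& 1) : Nat) : Int)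
                       + 15 * (((mask >>> 3 &&& 1) + (mask >>> 4 &&& 1) : Nat) : Int)
  (prep, cook)

-- ===== PRECONDITION & SPEC =====
def Spec_estimate_cooking_time_py (ingredients : List String) (instructions : List String) (out : Int × Int) : Prop := out = estimate_cooking_time_py_alt ingredients instructions
instance (ingredients : List String) (instructions : List String) (out : Int × Int) : Decidable (Spec_estimate_cooking_time_py ingredients instructions out) := by unfold Spec_estimate_cooking_time_py; infer_instance

-- ===== CLAIM (what is proved, stated in full; the proofs are below) =====
def Claim_equal_estimate_cooking_time_py : Prop := ∀ (ingredients : List String) (instructions : List String), Dom_estimate_cooking_time_py ingredients instructions → Spec_estimate_cooking_time_py ingredients instructions (estimate_cooking_time_py ingredients instructions)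

-- ===== LEMMAS AND PROOFS =====

-- the inner OR-fold factors its starting mask out
theorem pvStep_factor (mask : Nat) (inst : String) :
    pvStep mask inst = mask ||| pvStep 0 inst := by
  unfold pvStep pvBits
  simp only [List.foldl]
  split_ifs <;> simp [Nat.or_assoc]

-- the outer fold factors its starting mask out
theorem foldl_pvStep_factor (insts : List String) (mask : Nat) :
    insts.foldl pvStep mask = mask ||| insts.foldl pvStep 0 := by
  induction insts generalizing mask with
  | nil => simp
  | cons hd tl ih =>
    simp only [List.foldl_cons]
    rw [ih (pvStep mask hd), ih (pvStep 0 hd), pvStep_factor mask hd, Nat.or_assoc]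

-- bit i of the final mask = does any instruction match method i
theorem testBit_fold (insts : List String) (i : Nat) :
    (insts.foldl pvStep 0).testBit i
      = insts.any (fun inst => (pvStep 0 inst).testBit i) := by
  induction insts with
  | nil => simp [Nat.testBit]
  | cons hd tl ih =>
    simp only [List.foldl_cons, List.any_cons]
    rw [foldl_pvStep_factor tl (pvStep 0 hd), Nat.testBit_or, ih]

-- bits of one instruction's mask = substring test of the corresponding method
theorem testBit_pvStep (inst : String) (i : Nat) (m : String)
    (h : (i, m) ∈ [(0, "bake"), (1, "roast"), (2, "slow cook"),
                   (3, "simmer"), (4, "boil"), (5, "grill")].map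
           (fun p => ((p.1 : Nat), (p.2 : String)))) :
    (pvStep 0 inst).testBit i = PySem.Str.isIn m (PySem.Str.lower inst) := by
  unfold pvStep pvBits
  simp only [List.foldl]
  fin_cases h <;>
    (cases h0 : PySem.Str.isIn "bake" (PySem.Str.lower inst) <;>
     cases h1 : PySem.Str.isIn "roast" (PySem.Str.lower inst) <;>
     cases h2 : PySem.Str.isIn "slow cook" (PySem.Str.lower inst) <;>
     cases h3 : PySem.Str.isIn "simmer" (PySem.Str.lower inst) <;>
     cases h4 : PySem.Str.isIn "boil" (PySem.Str.lower inst) <;>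
     cases h5 : PySem.Str.isIn "grill" (PySem.Str.lower inst) <;>
     simp only [h0, h1, h2, h3, h4, h5, if_true, if_false, Bool.false_eq_true] <;>
     rfl)

-- extracting one bit arithmetically
theorem shift_and_one (n i : Nat) :
    (n >>> i &&& 1) = if n.testBit i then 1 else 0 := by
  rcases Nat.testBit n i |>.eq_false_or_eq_true with h | h <;>
    simp only [h, if_true] <;>
    [skip; skip] <;>
    · have := h
      simp [Nat.testBit, Nat.and_one_is_mod] at this ⊢
      omega

theorem estimate_cooking_time_py_eq (ingredients instructions : List String) :
    estimate_cooking_time_py ingredients instructions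
      = estimate_cooking_time_py_alt ingredients instructions := by
  unfold estimate_cooking_time_py estimate_cooking_time_py_alt
  refine Prod.ext ?_ ?_
  · simp only; split_ifs <;> omega
  · simp only
    have hbit : ∀ i m, (i, m) ∈ [((0:Nat), "bake"), (1, "roast"), (2, "slow cook"),
        (3, "simmer"), (4, "boil"), (5, "grill")] →
        ((instructions.foldl pvStep 0) >>> i &&& 1)
          = if instructions.any (fun inst => PySem.Str.isIn m (PySem.Str.lower inst))
            then 1 else 0 := by
      intro i m hm
      rw [shift_and_one, testBit_fold]
      have hfun : (fun inst => (pvStep 0 inst).testBit i)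
          = (fun inst => PySem.Str.isIn m (PySem.Str.lower inst)) :=
        funext (fun inst => testBit_pvStep inst i m (by fin_cases hm <;> simp))
      rw [hfun]
    have h0 := hbit 0 "bake" (by simp)
    have h1 := hbit 1 "roast" (by simp)
    have h2 := hbit 2 "slow cook" (by simp)
    have h3 := hbit 3 "simmer" (by simp)
    have h4 := hbit 4 "boil" (by simp)
    rw [show ((instructions.foldl pvStep 0) &&& 1)
          = ((instructions.foldl pvStep 0) >>> 0 &&& 1) by simp]
    rw [h0, h1, h2, h3, h4]
    have hA : (["bake", "roast", "slow cook", "simmer", "boil", "grill"] : List String).foldl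
        (fun bc method =>
          if instructions.any (fun inst => PySem.Str.isIn method (PySem.Str.lower inst)) then
            if (["bake", "roast", "slow cook"] : List String).contains method then bc + 30
            else if (["simmer", "boil"] : List String).contains method then bc + 15
            else bc
          else bc) (20 : Int)
        = 20 + ((["bake", "roast", "slow cook", "simmer", "boil", "grill"] : List String).map
            (fun method =>
              if instructions.any (fun inst => PySem.Str.isIn method (PySem.Str.lower inst)) then
                if (["bake", "roast", "slow cook"] : List String).contains method then (30 : Int)
                else if (["simmer", "boil"] : List String).contains method then 15
                else 0
              else 0)).sum := by
      rw [PySem.List.foldl_congr_mem (init := (20 : Int))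
            (l := (["bake", "roast", "slow cook", "simmer", "boil", "grill"] : List String))
            (f := fun (bc : Int) (method : String) =>
              if instructions.any (fun inst => PySem.Str.isIn method (PySem.Str.lower inst)) then
                if (["bake", "roast", "slow cook"] : List String).contains method then bc + 30
                else if (["simmer", "boil"] : List String).contains method then bc + 15
                else bc
              else bc)
            (g := fun (bc : Int) (method : String) =>
              bc + (if instructions.any (fun inst => PySem.Str.isIn method (PySem.Str.lower inst)) then
                if (["bake", "roast", "slow cook"] : List String).contains method then (30 : Int)
                else if (["simmer", "boil"] : List String).contains method then 15
                else 0
              else 0))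
            (by intro acc x _; dsimp only; split_ifs <;> omega),
          PySem.List.foldl_add]
    rw [hA]
    clear hbit h0 h1 h2 h3 h4 hA
    simp only [List.map_cons, List.map_nil, List.sum_cons, List.sum_nil]
    rw [show ((["bake", "roast", "slow cook"] : List String).contains "bake") = true from by decide,
        show ((["bake", "roast", "slow cook"] : List String).contains "roast") = true from by decide,
        show ((["bake", "roast", "slow cook"] : List String).contains "slow cook") = true from by decide,
        show ((["bake", "roast", "slow cook"] : List String).contains "simmer") = false from by decide,
        show ((["bake", "roast", "slow cook"] : List String).contains "boil") = false from by decide,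
        show ((["bake", "roast", "slow cook"] : List String).contains "grill") = false from by decide,
        show ((["simmer", "boil"] : List String).contains "simmer") = true from by decide,
        show ((["simmer", "boil"] : List String).contains "boil") = true from by decide,
        show ((["simmer", "boil"] : List String).contains "grill") = false from by decide]
    norm_num
    split_ifs <;> norm_num

-- ===== VERDICT (by name: the statement is the Claim_ definition above) =====
theorem estimate_cooking_time_py_spec : Claim_equal_estimate_cooking_time_py := by
  intro ingredients instructions _
  unfold Spec_estimate_cooking_time_py
  exact estimate_cooking_time_py_eq ingredients instructions
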